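-- pv_equiv track=rewrite | github.com/pierrefdz/DNA-sequence-classification-with-kernel-methods | utils.py | m_neighbours
-- ===== SOURCE A (Python) =====
-- def m_neighbours(kmer, m, recurs=0):
--     """
--     Return a list of neighbours kmers (up to m mismatches).
--     """
--     if m == 0:
--         return [kmer]
--
--     letters = ['G', 'T', 'A', 'C']
--     k = len(kmer)
--     neighbours = m_neighbours(kmer, m - 1, recurs + 1)
--
--     for j in range(len(neighbours)):
--         neighbour = neighbours[j]
--         for i in range(recurs, k - m + 1):
--             for l in letters:
--                 neighbours.append(neighbour[:i] + l + neighbour[i + 1:])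
--     return list(set(neighbours))
-- ===== SOURCE B (Python) =====
-- def m_neighbours(kmer, m, recurs=0):
--     """
--     Return a list of neighbours kmers (up to m mismatches).
--     Bottom-up instead of recursive: one extend-and-dedup pass per
--     mismatch level, with the level's window start computed directly.
--     """
--     k = len(kmer)
--     neighbours = [kmer]
--     for step in range(1, m + 1):
--         r = recurs + m - step
--         for nb in list(neighbours):
--             for i in range(r, k - step + 1):
--                 for l in ['G', 'T', 'A', 'C']:
--                     neighbours.append(nb[:i] + l + nb[i + 1:])
--         neighbours = list(set(neighbours))
--     return neighbours
-- ===== Notes on version B (the rewrite author's own statement) =====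
-- stated objective: alternative
-- what changed: Replaces A's recursion on m (which threads a recurs counter down and rebuilds list(set(...)) on the way back up) by a single bottom-up loop over mismatch levels that computes each level's window start r = recurs + m - step directly and dedups the level in place.
import Mathlib
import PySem

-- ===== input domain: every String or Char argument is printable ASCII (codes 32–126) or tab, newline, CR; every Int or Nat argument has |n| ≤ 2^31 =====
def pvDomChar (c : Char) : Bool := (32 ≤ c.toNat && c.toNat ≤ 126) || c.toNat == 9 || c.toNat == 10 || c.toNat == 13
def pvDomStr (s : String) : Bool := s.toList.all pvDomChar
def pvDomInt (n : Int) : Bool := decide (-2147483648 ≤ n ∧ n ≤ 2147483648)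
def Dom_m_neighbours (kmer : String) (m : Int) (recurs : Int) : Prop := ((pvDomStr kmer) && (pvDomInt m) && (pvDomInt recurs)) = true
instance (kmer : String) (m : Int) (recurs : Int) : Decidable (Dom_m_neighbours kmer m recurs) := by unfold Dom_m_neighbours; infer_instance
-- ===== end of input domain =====

-- B replaces A's recursion on m by a bottom-up loop over mismatch levels, computing each
-- level's window start directly (objective: alternative decomposition; equal values proved below).


-- ===== PORT A =====
-- neighbour[:i] + l + neighbour[i+1:], the identical expression in both Pythons
-- (exact: Python slices/concatenation on code points)
def pvSub (nb : String) (i : Int) (l : String) : String :=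
  String.ofList (PySem.List.slice nb.toList none (some i) ++ l.toList ++
    PySem.List.slice nb.toList (some (i + 1)) none)

def m_neighbours (kmer : String) (m : Int) (recurs : Int) : List String :=
  if _h0 : m = 0 then [kmer]
  else if _hneg : m < 0 then [kmer]  -- totality guard only: Python raises RecursionError for m < 0 (excluded by Pre_)
  else
    let letters : List String := ["G", "T", "A", "C"]
    let k : Int := PySem.Str.len kmer
    let neighbours0 := m_neighbours kmer (m - 1) (recurs + 1)
    let neighbours := neighbours0.foldl (fun acc neighbour =>
      (PySem.List.pyRange recurs (k - m + 1) 1).foldl (fun acc2 i =>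
        letters.foldl (fun acc3 l => acc3 ++ [pvSub neighbour i l]) acc2) acc) neighbours0
    PySem.Set.ofList neighbours
termination_by m.toNat
decreasing_by omega

-- ===== PORT B =====
-- bottom-up: for step in 1..m, extend every current neighbour over the level's window
-- (start r = recurs + m - step), then dedup the level with list(set(...))
def m_neighbours_alt (kmer : String) (m : Int) (recurs : Int) : List String :=
  let k : Int := PySem.Str.len kmer
  (PySem.List.pyRange 1 (m + 1) 1).foldl
    (fun neighbours step =>
      let r := recurs + m - step
      let ns := neighbours.foldl (fun acc nb =>
        (PySem.List.pyRange r (k - step + 1) 1).foldl (fun a2 i =>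
          (["G", "T", "A", "C"] : List String).foldl (fun a3 l => a3 ++ [pvSub nb i l]) a2) acc)
        neighbours
      PySem.Set.ofList ns)
    [kmer]

-- ===== PRECONDITION & SPEC =====
-- Pre_ excludes exactly m < 0, where Python A recurses without reaching its base case
-- and raises RecursionError (no value is returned there).
def Pre_m_neighbours (kmer : String) (m : Int) (recurs : Int) : Prop := 0 ≤ m
instance (kmer : String) (m : Int) (recurs : Int) : Decidable (Pre_m_neighbours kmer m recurs) := by unfold Pre_m_neighbours; infer_instance
def pvWitness_m_neighbours : String × Int × Int := ("GAT", 1, 0)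

def Spec_m_neighbours (kmer : String) (m : Int) (recurs : Int) (out : List String) : Prop := out = m_neighbours_alt kmer m recurs
instance (kmer : String) (m : Int) (recurs : Int) (out : List String) : Decidable (Spec_m_neighbours kmer m recurs out) := by unfold Spec_m_neighbours; infer_instance

-- ===== CLAIM (what is proved, stated in full; the proofs are below) =====
def Claim_equal_m_neighbours : Prop := ∀ (kmer : String) (m : Int) (recurs : Int), Dom_m_neighbours kmer m recurs → Pre_m_neighbours kmer m recurs → Spec_m_neighbours kmer m recurs (m_neighbours kmer m recurs)

-- ===== LEMMAS AND PROOFS =====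

-- the substitutions one level generates from one neighbour (window r .. k - s, letters G T A C)
def pvE (kmer : String) (r s : Int) (nb : String) : List String :=
  (PySem.List.pyRange r (PySem.Str.len kmer - s + 1) 1).flatMap
    (fun i => (["G", "T", "A", "C"] : List String).flatMap (fun l => [pvSub nb i l]))

-- one extend-and-dedup level on an already dup-free list
def pvLevel (kmer : String) (r s : Int) (o : List String) : List String :=
  PySem.Set.update o (o.flatMap (pvE kmer r s))

-- the common spine: n levels, window start r at the outermost
def pvIter (kmer : String) : Nat → Int → List String
  | 0, _ => [kmer]
  | p + 1, r => pvLevel kmer r ((p : Int) + 1) (pvIter kmer p (r + 1))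

theorem pvFoldAddNodup {β : Type} [BEq β] [LawfulBEq β] (l : List β) :
    ∀ acc : List β, (acc ++ l).Nodup → l.foldl PySem.Set.add acc = acc ++ l := by
  induction l with
  | nil => intro acc _; simp
  | cons x xs ih =>
    intro acc h
    rw [List.append_cons] at h
    have hx : x ∉ acc := by
      have h1 : (acc ++ [x]).Nodup := h.sublist (List.sublist_append_left _ _)
      intro hmem
      exact (List.disjoint_of_nodup_append h1 hmem) (List.mem_singleton_self x)
    have hadd : PySem.Set.add acc x = acc ++ [x] := by simp [PySem.Set.add, hx]
    calc (x :: xs).foldl PySem.Set.add acc = xs.foldl PySem.Set.add (PySem.Set.add acc x) := rfl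
      _ = xs.foldl PySem.Set.add (acc ++ [x]) := by rw [hadd]
      _ = (acc ++ [x]) ++ xs := ih (acc ++ [x]) h
      _ = acc ++ x :: xs := by simp

theorem pvOfListSelf {β : Type} [BEq β] [LawfulBEq β] (l : List β) (h : l.Nodup) :
    PySem.Set.ofList l = l := by
  rw [PySem.Set.ofList_eq_foldl]
  simpa using pvFoldAddNodup l [] (by simpa)

theorem pvNodupIter (kmer : String) : ∀ (n : Nat) (r : Int), (pvIter kmer n r).Nodup := by
  intro n
  induction n with
  | zero => intro r; simp [pvIter]
  | succ p ih =>
    intro r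
    exact PySem.Set.nodup_update _ _ (ih (r + 1))

-- the shared extend-then-list(set(...)) level of both Pythons, on a dup-free input list
theorem pvLevelOf (kmer : String) (r s : Int) (o : List String) (h : o.Nodup) :
    PySem.Set.ofList (o.foldl (fun acc nb =>
      (PySem.List.pyRange r (PySem.Str.len kmer - s + 1) 1).foldl (fun a2 i =>
        (["G", "T", "A", "C"] : List String).foldl
          (fun a3 l => a3 ++ [pvSub nb i l]) a2) acc) o)
      = pvLevel kmer r s o := by
  simp only [PySem.List.foldl_append_eq_flatMap]
  rw [PySem.Set.ofList_eq_foldl, List.foldl_append, ← PySem.Set.ofList_eq_foldl,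
    pvOfListSelf _ h]
  show PySem.Set.update _ _ = _
  unfold pvLevel pvE
  congr 2

theorem pvA_eq_iter (kmer : String) : ∀ (n : Nat) (r : Int),
    m_neighbours kmer (n : Int) r = pvIter kmer n r := by
  intro n
  induction n with
  | zero => intro r; simp [m_neighbours, pvIter]
  | succ p ih =>
    intro r
    rw [m_neighbours]
    have hc1 : ¬ (((p + 1 : Nat) : Int) = 0) := by push_cast; omega
    have hc2 : ¬ (((p + 1 : Nat) : Int) < 0) := by push_cast; omega
    rw [dif_neg hc1, dif_neg hc2]
    have harg : ((p + 1 : Nat) : Int) - 1 = (p : Int) := by push_cast; ring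
    rw [harg, ih]
    simp only []
    push_cast
    rw [pvLevelOf kmer r ((p : Int) + 1) _ (pvNodupIter kmer p (r + 1))]
    rw [pvIter]

theorem pvB_spine (kmer : String) (c : Int) : ∀ (n : Nat),
    (PySem.List.pyRange 1 ((n : Int) + 1) 1).foldl
      (fun o step => PySem.Set.ofList (o.foldl (fun acc nb =>
        (PySem.List.pyRange (c - step) (PySem.Str.len kmer - step + 1) 1).foldl (fun a2 i =>
          (["G", "T", "A", "C"] : List String).foldl
            (fun a3 l => a3 ++ [pvSub nb i l]) a2) acc) o)) [kmer]
      = pvIter kmer n (c - n) := by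
  intro n
  induction n with
  | zero => simp [pvIter]
  | succ p ih =>
    have hsplit : PySem.List.pyRange 1 (((p + 1 : Nat) : Int) + 1) 1
        = PySem.List.pyRange 1 ((p : Int) + 1) 1 ++ [(p : Int) + 1] := by
      rw [PySem.List.pyRange_one_append 1 ((p : Int) + 1) (((p + 1 : Nat) : Int) + 1)
        (by omega) (by push_cast; omega)]
      congr 1
      have : (((p + 1 : Nat) : Int) + 1) = ((p : Int) + 1) + 1 := by push_cast; ring
      rw [this]
      simp [PySem.List.pyRange_one]
    rw [hsplit, List.foldl_append, ih, List.foldl_cons, List.foldl_nil]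
    rw [pvLevelOf kmer (c - ((p : Int) + 1)) ((p : Int) + 1) _ (pvNodupIter kmer p (c - p))]
    rw [pvIter]
    have h1 : c - ((p + 1 : Nat) : Int) = c - ((p : Int) + 1) := by push_cast; ring
    have h2 : c - (p : Int) = c - ((p : Int) + 1) + 1 := by ring
    rw [h1, h2]

theorem pvB_eq_iter (kmer : String) (recurs : Int) (n : Nat) :
    m_neighbours_alt kmer (n : Int) recurs = pvIter kmer n recurs := by
  have h := pvB_spine kmer (recurs + (n : Int)) n
  have h2 : recurs + (n : Int) - (n : Int) = recurs := by ring
  rw [h2] at h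
  exact h

-- ===== VERDICT (by name: the statement is the Claim_ definition above) =====
theorem m_neighbours_spec : Claim_equal_m_neighbours := by
  intro kmer m recurs _ hpre
  unfold Spec_m_neighbours
  unfold Pre_m_neighbours at hpre
  obtain ⟨n, rfl⟩ : ∃ n : Nat, m = (n : Int) := ⟨m.toNat, (Int.toNat_of_nonneg hpre).symm⟩
  rw [pvA_eq_iter, pvB_eq_iter]
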